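-- pv_equiv track=rewrite | github.com/mdfarazzakir/Pes_Python_Assignment-3 | Program60/stringPackage/string19.py | List1
-- ===== SOURCE A (Python) =====
-- def List1(temp,l1,list1,Maxlist,Minlist):
--     for i in range(0,l1):
--         for j in range(0,l1):
--             if list1[i]>list1[j]:
--                 temp = list1[i]
--                 list1[i] = list1[j]
--                 list1[j] = temp
--     Maxlist.append(list1[0])
--     Maxlist.append(list1[1])
--     Minlist.append(list1[l1-1])
--     Minlist.append(list1[l1-2])
--     return(Maxlist)
--     return(Minlist)
-- ===== SOURCE B (Python) =====
-- def List1(temp, l1, list1, Maxlist, Minlist):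
--     # Sort the first l1 elements descending with the library sort (A does it
--     # with an O(l1^2) compare-and-swap double loop); same in-place mutation.
--     k = max(l1, 0)
--     list1[:k] = sorted(list1[:k], reverse=True)
--     Maxlist.append(list1[0])
--     Maxlist.append(list1[1])
--     Minlist.append(list1[l1 - 1])
--     Minlist.append(list1[l1 - 2])
--     return Maxlist
-- ===== Notes on version B (the rewrite author's own statement) =====
-- stated objective: faster
-- what changed: Replaces A's quadratic double-loop compare-and-swap sort of the first l1 elements by a single library sorted(..., reverse=True) call spliced back over the prefix; the appends and return are unchanged.
import Mathlib
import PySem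

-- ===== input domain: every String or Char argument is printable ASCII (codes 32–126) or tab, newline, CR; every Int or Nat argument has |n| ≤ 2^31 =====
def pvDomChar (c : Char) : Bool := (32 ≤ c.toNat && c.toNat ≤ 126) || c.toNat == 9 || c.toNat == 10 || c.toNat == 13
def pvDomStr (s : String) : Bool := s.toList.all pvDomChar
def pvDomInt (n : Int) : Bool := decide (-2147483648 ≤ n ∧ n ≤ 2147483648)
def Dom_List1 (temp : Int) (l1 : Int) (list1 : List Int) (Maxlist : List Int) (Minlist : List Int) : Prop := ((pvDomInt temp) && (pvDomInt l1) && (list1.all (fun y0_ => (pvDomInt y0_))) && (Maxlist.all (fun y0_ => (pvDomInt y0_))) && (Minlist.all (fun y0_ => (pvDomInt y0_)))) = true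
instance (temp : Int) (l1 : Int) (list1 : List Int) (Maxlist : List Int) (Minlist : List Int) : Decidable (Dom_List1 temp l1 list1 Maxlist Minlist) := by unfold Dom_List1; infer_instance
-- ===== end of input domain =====

-- B replaces A's quadratic compare-and-swap double loop over the first l1 elements by one
-- library sort (descending) spliced over that prefix; the equivalence proved is about the
-- RETURN value (both Pythons also mutate list1/Maxlist/Minlist in place, identically).

-- ===== PORT A =====
def List1 (temp : Int) (l1 : Int) (list1 : List Int) (Maxlist : List Int) (Minlist : List Int) : List Int :=
  -- for i in range(0,l1): for j in range(0,l1): if list1[i]>list1[j]: swap via temp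
  let st :=
    (PySem.List.pyRange 0 l1 1).foldl (fun st i =>
      (PySem.List.pyRange 0 l1 1).foldl (fun st j =>
        if PySem.List.pyGetD st.2 i 0 > PySem.List.pyGetD st.2 j 0 then
          let t := PySem.List.pyGetD st.2 i 0
          let a := PySem.List.pySetD st.2 i (PySem.List.pyGetD st.2 j 0)
          (t, PySem.List.pySetD a j t)
        else st) st) (temp, list1)
  -- Maxlist.append(list1[0]); Maxlist.append(list1[1]); the two Minlist.append calls only
  -- mutate the Minlist argument and do not reach the returned value; return(Maxlist)
  (Maxlist ++ [PySem.List.pyGetD st.2 0 0]) ++ [PySem.List.pyGetD st.2 1 0]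

-- ===== PORT B =====
def List1_alt (temp : Int) (l1 : Int) (list1 : List Int) (Maxlist : List Int) (Minlist : List Int) : List Int :=
  -- k = max(l1, 0); list1[:k] = sorted(list1[:k], reverse=True)
  let k : Int := max l1 0
  let head := PySem.List.sorted (PySem.List.slice list1 none (some k)) (fun x => x) true
  let a := head ++ PySem.List.slice list1 (some k) none
  -- Maxlist.append(list1[0]); Maxlist.append(list1[1]); Minlist mutation does not reach the return
  (Maxlist ++ [PySem.List.pyGetD a 0 0]) ++ [PySem.List.pyGetD a 1 0]

-- ===== PRECONDITION & SPEC =====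
-- Exactly the inputs on which the Python A returns: every index it touches is in range
-- (list1[0], list1[1], the loop indices i,j < l1 and the possibly negative l1-1, l1-2).
def Pre_List1 (temp : Int) (l1 : Int) (list1 : List Int) (Maxlist : List Int) (Minlist : List Int) : Prop :=
  2 ≤ list1.length ∧ l1 ≤ (list1.length : Int) ∧ 2 - (list1.length : Int) ≤ l1
instance (temp : Int) (l1 : Int) (list1 : List Int) (Maxlist : List Int) (Minlist : List Int) : Decidable (Pre_List1 temp l1 list1 Maxlist Minlist) := by unfold Pre_List1; infer_instance

def pvWitness_List1 : Int × Int × List Int × List Int × List Int := (0, 3, [5, 1, 4], [], [9])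

def Spec_List1 (temp : Int) (l1 : Int) (list1 : List Int) (Maxlist : List Int) (Minlist : List Int) (out : List Int) : Prop := out = List1_alt temp l1 list1 Maxlist Minlist
instance (temp : Int) (l1 : Int) (list1 : List Int) (Maxlist : List Int) (Minlist : List Int) (out : List Int) : Decidable (Spec_List1 temp l1 list1 Maxlist Minlist out) := by unfold Spec_List1; infer_instance

-- ===== CLAIM (what is proved, stated in full; the proofs are below) =====
def Claim_equal_List1 : Prop := ∀ (temp : Int) (l1 : Int) (list1 : List Int) (Maxlist : List Int) (Minlist : List Int), Dom_List1 temp l1 list1 Maxlist Minlist → Pre_List1 temp l1 list1 Maxlist Minlist → Spec_List1 temp l1 list1 Maxlist Minlist (List1 temp l1 list1 Maxlist Minlist)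

-- ===== LEMMAS AND PROOFS =====

-- A clean Nat-indexed model of A's double loop (the ports are bridged to it below).
def pvStep (i j : Nat) (a : List Int) : List Int :=
  if a.getD j 0 < a.getD i 0 then (a.set i (a.getD j 0)).set j (a.getD i 0) else a

def pvInner (i n : Nat) (a : List Int) : List Int :=
  (List.range n).foldl (fun a j => pvStep i j a) a

def pvLoop (n : Nat) (a : List Int) : List Int :=
  (List.range n).foldl (fun a i => pvInner i n a) a

-- "the first m positions are in descending order"
def pvDesc (a : List Int) (m : Nat) : Prop :=
  ∀ p q, p < q → q < m → a.getD q 0 ≤ a.getD p 0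

theorem pv_swap_perm (l : List Int) (i j : Nat) (hi : i < l.length) (hj : j < l.length) :
    ((l.set i (l.getD j 0)).set j (l.getD i 0)).Perm l := by
  have harr : (l.toArray.swap i j (by simpa) (by simpa)).toList
      = (l.set i (l.getD j 0)).set j (l.getD i 0) := by
    simp [Array.swap, hi, hj, List.getD_eq_getElem?_getD]
  rw [← harr]
  have := Array.swap_perm (xs := l.toArray) (i := i) (j := j) (by simpa) (by simpa)
  rwa [Array.perm_iff_toList_perm] at this

theorem pv_length_step (i j : Nat) (a : List Int) : (pvStep i j a).length = a.length := by
  unfold pvStep; split <;> simp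

theorem pv_step_perm (i j : Nat) (a : List Int) (hi : i < a.length) (hj : j < a.length) :
    (pvStep i j a).Perm a := by
  unfold pvStep; split
  · exact pv_swap_perm a i j hi hj
  · exact List.Perm.refl a

theorem pv_drop_step (i j n : Nat) (a : List Int) (hi : i < n) (hj : j < n) :
    (pvStep i j a).drop n = a.drop n := by
  unfold pvStep; split
  · rw [List.drop_set, List.drop_set]; simp [hi, hj]
  · rfl

theorem pv_getD_set (l : List Int) (i p : Nat) (v : Int) (hi : i < l.length) :
    (l.set i v).getD p 0 = if p = i then v else l.getD p 0 := by
  simp only [List.getD_eq_getElem?_getD, List.getElem?_set]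
  by_cases hp : p = i
  · subst hp; rw [if_pos rfl, if_pos rfl, if_pos hi]; rfl
  · rw [if_neg (fun h => hp h.symm), if_neg hp]

theorem pv_step_getD (i j p : Nat) (a : List Int) (hi : i < a.length) (hj : j < a.length) :
    (pvStep i j a).getD p 0 =
      if a.getD j 0 < a.getD i 0 then
        (if p = j then a.getD i 0 else if p = i then a.getD j 0 else a.getD p 0)
      else a.getD p 0 := by
  unfold pvStep; split
  · rw [pv_getD_set _ j p _ (by simpa using hj)]
    by_cases hpj : p = j
    · rw [if_pos hpj, if_pos hpj]
    · rw [if_neg hpj, if_neg hpj, pv_getD_set _ i p _ hi]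
  · rfl

-- the two pointwise corollaries used below
theorem pv_step_getD_swap (i j p : Nat) (a : List Int) (hi : i < a.length) (hj : j < a.length)
    (hsw : a.getD j 0 < a.getD i 0) :
    (pvStep i j a).getD p 0 =
      (if p = j then a.getD i 0 else if p = i then a.getD j 0 else a.getD p 0) := by
  rw [pv_step_getD i j p a hi hj, if_pos hsw]

theorem pv_step_noswap (i j : Nat) (a : List Int) (hsw : ¬ a.getD j 0 < a.getD i 0) :
    pvStep i j a = a := by
  unfold pvStep; rw [if_neg hsw]

-- length / permutation / untouched-tail facts for any run of pvStep's with indices below n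
theorem pv_fold_facts (i n : Nat) (js : List Nat) :
    ∀ (a : List Int), (∀ j ∈ js, j < n) → i < n → n ≤ a.length →
    (js.foldl (fun a j => pvStep i j a) a).length = a.length ∧
    (js.foldl (fun a j => pvStep i j a) a).Perm a ∧
    (js.foldl (fun a j => pvStep i j a) a).drop n = a.drop n := by
  induction js with
  | nil => intro a _ _ _; exact ⟨rfl, List.Perm.refl a, rfl⟩
  | cons j js ih =>
    intro a hmem hi hn
    have hj : j < n := hmem j (by simp)
    have hlen : (pvStep i j a).length = a.length := pv_length_step i j a
    simp only [List.foldl_cons]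
    obtain ⟨h1, h2, h3⟩ := ih (pvStep i j a)
      (fun x hx => hmem x (by simp [hx])) hi (by omega)
    refine ⟨by rw [h1, hlen], ?_, ?_⟩
    · exact h2.trans (pv_step_perm i j a (by omega) (by omega))
    · rw [h3, pv_drop_step i j n a hi hj]

-- Phase 1 (j < i): inserting a[i] into the already-descending prefix a[0..i-1]
theorem pv_phase1 (i : Nat) :
    ∀ (m : Nat) (a : List Int), m ≤ i → i < a.length → pvDesc a i →
    pvDesc ((List.range m).foldl (fun a j => pvStep i j a) a) i ∧
    (∀ p, p < m →
      ((List.range m).foldl (fun a j => pvStep i j a) a).getD i 0 ≤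
      ((List.range m).foldl (fun a j => pvStep i j a) a).getD p 0) := by
  intro m
  induction m with
  | zero => intro a _ _ hd; exact ⟨hd, by omega⟩
  | succ m ih =>
    intro a hm hi hd
    rw [List.range_succ, List.foldl_append]
    obtain ⟨hdb, hib⟩ := ih a (by omega) hi hd
    set b := (List.range m).foldl (fun a j => pvStep i j a) a with hb
    have hblen : b.length = a.length :=
      (pv_fold_facts i a.length (List.range m) a
        (fun j hj => by have := List.mem_range.mp hj; omega) hi le_rfl).1
    have hm' : m < i := by omega
    have hiL : i < b.length := by omega
    have hmL : m < b.length := by omega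
    simp only [List.foldl_cons, List.foldl_nil]
    by_cases hsw : b.getD m 0 < b.getD i 0
    · constructor
      · intro p q hpq hq
        have hpi : ¬ p = i := by omega
        have hqi : ¬ q = i := by omega
        rw [pv_step_getD_swap i m p b hiL hmL hsw, pv_step_getD_swap i m q b hiL hmL hsw]
        by_cases hqm : q = m
        · by_cases hpm : p = m
          · omega
          · rw [if_pos hqm, if_neg hpm, if_neg hpi]
            exact hib p (by omega)
        · by_cases hpm : p = m
          · rw [if_neg hqm, if_neg hqi, if_pos hpm]
            have h1 : b.getD q 0 ≤ b.getD m 0 := hdb m q (by omega) hq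
            linarith
          · rw [if_neg hqm, if_neg hqi, if_neg hpm, if_neg hpi]
            exact hdb p q hpq hq
      · intro p hp
        have him : ¬ i = m := by omega
        rw [pv_step_getD_swap i m p b hiL hmL hsw,
          pv_step_getD_swap i m i b hiL hmL hsw, if_neg him, if_pos rfl]
        by_cases hpm : p = m
        · rw [if_pos hpm]; linarith
        · have hpi : ¬ p = i := by omega
          rw [if_neg hpm, if_neg hpi]
          have := hib p (by omega)
          linarith
    · rw [pv_step_noswap i m b hsw]
      refine ⟨hdb, ?_⟩
      intro p hp
      by_cases hpm : p = m
      · subst hpm; exact le_of_not_gt hsw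
      · exact hib p (by omega)

theorem pv_step_self (i : Nat) (a : List Int) : pvStep i i a = a := by
  unfold pvStep; simp

-- Phase 3 (j > i): the descending prefix a[0..i] survives (a[i] can only decrease)
theorem pv_phase3 (i : Nat) (js : List Nat) :
    ∀ (a : List Int), (∀ j ∈ js, i < j ∧ j < a.length) → i < a.length → pvDesc a (i + 1) →
    pvDesc (js.foldl (fun a j => pvStep i j a) a) (i + 1) := by
  induction js with
  | nil => intro a _ _ hd; exact hd
  | cons j js ih =>
    intro a hmem hi hd
    obtain ⟨hij, hjL⟩ := hmem j (by simp)
    have hlen : (pvStep i j a).length = a.length := pv_length_step i j a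
    simp only [List.foldl_cons]
    refine ih (pvStep i j a) (fun x hx => ?_) (by omega) ?_
    · have := hmem x (by simp [hx]); omega
    · intro p q hpq hq
      by_cases hsw : a.getD j 0 < a.getD i 0
      · have hpj : ¬ p = j := by omega
        have hqj : ¬ q = j := by omega
        rw [pv_step_getD_swap i j p a hi hjL hsw, pv_step_getD_swap i j q a hi hjL hsw,
          if_neg hpj, if_neg hqj]
        by_cases hqi : q = i
        · have hpi : ¬ p = i := by omega
          rw [if_pos hqi, if_neg hpi]
          have h1 : a.getD i 0 ≤ a.getD p 0 := hd p i (by omega) (by omega)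
          linarith
        · have hpi : ¬ p = i := by omega
          rw [if_neg hqi, if_neg hpi]
          exact hd p q hpq hq
      · rw [pv_step_noswap i j a hsw]
        exact hd p q hpq hq

theorem pv_inner_sorted (i n : Nat) (a : List Int) (hin : i < n) (hlen : n ≤ a.length)
    (hd : pvDesc a i) : pvDesc (pvInner i n a) (i + 1) := by
  unfold pvInner
  have hsplit : n = (i + 1) + (n - (i + 1)) := by omega
  rw [hsplit, List.range_add, List.foldl_append, List.range_succ, List.foldl_append]
  obtain ⟨hd1, hi1⟩ := pv_phase1 i i a le_rfl (by omega) hd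
  set b := (List.range i).foldl (fun a j => pvStep i j a) a with hb
  have hblen : b.length = a.length :=
    (pv_fold_facts i a.length (List.range i) a
      (fun j hj => by have := List.mem_range.mp hj; omega) (by omega) le_rfl).1
  have hdb : pvDesc b (i + 1) := by
    intro p q hpq hq
    by_cases hqi : q = i
    · subst hqi; exact hi1 p hpq
    · exact hd1 p q hpq (by omega)
  simp only [List.foldl_cons, List.foldl_nil, pv_step_self]
  exact pv_phase3 i _ b
    (fun j hj => by
      obtain ⟨k, hk, rfl⟩ := List.mem_map.mp hj
      have := List.mem_range.mp hk
      constructor <;> omega)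
    (by omega) hdb

theorem pv_inner_facts (i n : Nat) (a : List Int) (hin : i < n) (hlen : n ≤ a.length) :
    (pvInner i n a).length = a.length ∧ (pvInner i n a).Perm a ∧
    (pvInner i n a).drop n = a.drop n :=
  pv_fold_facts i n (List.range n) a (fun j hj => List.mem_range.mp hj) hin hlen

theorem pv_loop_all (n : Nat) :
    ∀ (m : Nat) (a : List Int), m ≤ n → n ≤ a.length →
    ((List.range m).foldl (fun a i => pvInner i n a) a).length = a.length ∧
    ((List.range m).foldl (fun a i => pvInner i n a) a).Perm a ∧
    ((List.range m).foldl (fun a i => pvInner i n a) a).drop n = a.drop n ∧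
    pvDesc ((List.range m).foldl (fun a i => pvInner i n a) a) m := by
  intro m
  induction m with
  | zero => intro a _ _; exact ⟨rfl, List.Perm.refl a, rfl, by intro p q _ hq; omega⟩
  | succ m ih =>
    intro a hm hn
    rw [List.range_succ, List.foldl_append]
    obtain ⟨h1, h2, h3, h4⟩ := ih a (by omega) hn
    set c := (List.range m).foldl (fun a i => pvInner i n a) a with hc
    have hnc : n ≤ c.length := by omega
    obtain ⟨g1, g2, g3⟩ := pv_inner_facts m n c (by omega) hnc
    simp only [List.foldl_cons, List.foldl_nil]
    refine ⟨by rw [g1, h1], g2.trans h2, by rw [g3, h3], ?_⟩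
    exact pv_inner_sorted m n c (by omega) hnc h4

-- The characterisation of A's double loop: it sorts the first n elements descending.
theorem pvLoop_eq (n : Nat) (a : List Int) (h : n ≤ a.length) :
    pvLoop n a = PySem.List.sorted (a.take n) (fun x => x) true ++ a.drop n := by
  obtain ⟨h1, h2, h3, h4⟩ := pv_loop_all n n a le_rfl h
  unfold pvLoop
  generalize hBdef : (List.range n).foldl (fun a i => pvInner i n a) a = B at h1 h2 h3 h4 ⊢
  have hsplit : B = B.take n ++ B.drop n := (List.take_append_drop n B).symm
  have htlen : (B.take n).length = n := by rw [List.length_take]; omega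
  have hperm : (B.take n).Perm (a.take n) := by
    have hA : a.take n ++ a.drop n = a := List.take_append_drop n a
    have hx : (B.take n ++ B.drop n).Perm (a.take n ++ a.drop n) := by
      rw [← hsplit, hA]; exact h2
    rw [h3] at hx
    exact (List.perm_append_right_iff _).mp hx
  have hBsorted : (B.take n).Pairwise (fun x y : Int => y ≤ x) := by
    rw [List.pairwise_iff_getElem]
    intro p q hp hq hpq
    rw [htlen] at hp hq
    have e1 : (B.take n)[p]'(by omega) = B.getD p 0 := by
      rw [List.getElem_take, List.getD_eq_getElem B 0 (by omega)]
    have e2 : (B.take n)[q]'(by omega) = B.getD q 0 := by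
      rw [List.getElem_take, List.getD_eq_getElem B 0 (by omega)]
    rw [e1, e2]
    exact h4 p q hpq hq
  have hSsorted : (PySem.List.sorted (a.take n) (fun x => x) true).Pairwise
      (fun x y : Int => y ≤ x) := by
    simpa using PySem.List.sorted_pairwise_rev (xs := a.take n) (key := fun x => x)
  have hSperm : (B.take n).Perm (PySem.List.sorted (a.take n) (fun x => x) true) :=
    hperm.trans (PySem.List.sorted_perm (xs := a.take n) (key := fun x => x)
      (rev := true)).symm
  have hmain : B.take n = PySem.List.sorted (a.take n) (fun x => x) true :=
    List.Perm.eq_of_pairwise (fun x y _ _ h1' h2' => le_antisymm h2' h1')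
      hBsorted hSsorted hSperm
  rw [hsplit, hmain, h3]

-- snd of a fold over pairs, when the list component evolves on its own
theorem pv_snd_foldl {β : Type} (F : (Int × List Int) → β → (Int × List Int))
    (g : List Int → β → List Int) (h : ∀ st x, (F st x).2 = g st.2 x) :
    ∀ (js : List β) (st : Int × List Int), (js.foldl F st).2 = js.foldl g st.2 := by
  intro js
  induction js with
  | nil => intro st; rfl
  | cons j js ih => intro st; rw [List.foldl_cons, List.foldl_cons, ih, h]

-- Bridge: port A's return value, via the Nat model
theorem List1_bridge (temp l1 : Int) (list1 Maxlist Minlist : List Int) :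
    List1 temp l1 list1 Maxlist Minlist =
      (Maxlist ++ [(pvLoop l1.toNat list1).getD 0 0]) ++ [(pvLoop l1.toNat list1).getD 1 0] := by
  unfold List1
  dsimp only
  have hrange : PySem.List.pyRange 0 l1 1 = (List.range l1.toNat).map (fun k : Nat => ((k : Int))) := by
    rw [PySem.List.pyRange_one]; simp
  simp only [hrange, List.foldl_map]
  have houter : ∀ (st : Int × List Int) (i : Nat),
      ((List.range l1.toNat).foldl (fun st (j : Nat) =>
        if PySem.List.pyGetD st.2 (i : Int) 0 > PySem.List.pyGetD st.2 (j : Int) 0 then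
          ((PySem.List.pyGetD st.2 (i : Int) 0 : Int),
            PySem.List.pySetD (PySem.List.pySetD st.2 (i : Int) (PySem.List.pyGetD st.2 (j : Int) 0)) (j : Int)
              (PySem.List.pyGetD st.2 (i : Int) 0))
        else st) st).2 = pvInner i l1.toNat st.2 := by
    intro st i
    unfold pvInner
    apply pv_snd_foldl
    intro st' j
    by_cases hsw : st'.2.getD j 0 < st'.2.getD i 0
    · simp only [PySem.List.pyGetD_natCast, PySem.List.pySetD_natCast, gt_iff_lt]
      rw [if_pos hsw]
      unfold pvStep
      rw [if_pos hsw]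
    · simp only [PySem.List.pyGetD_natCast, PySem.List.pySetD_natCast, gt_iff_lt]
      rw [if_neg hsw, pv_step_noswap i j st'.2 hsw]
  rw [pv_snd_foldl _ (fun a (i : Nat) => pvInner i l1.toNat a) houter]
  simp only [PySem.List.pyGetD_zero, PySem.List.pyGetD_ofNat']
  unfold pvLoop
  rfl

-- Bridge: port B's return value
theorem List1_alt_bridge (temp l1 : Int) (list1 Maxlist Minlist : List Int) :
    List1_alt temp l1 list1 Maxlist Minlist =
      (Maxlist ++ [(PySem.List.sorted (list1.take l1.toNat) (fun x => x) true ++ list1.drop l1.toNat).getD 0 0])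
        ++ [(PySem.List.sorted (list1.take l1.toNat) (fun x => x) true ++ list1.drop l1.toNat).getD 1 0] := by
  unfold List1_alt
  dsimp only
  rw [← Int.toNat_eq_max]
  rw [PySem.List.slice_to_natCast, PySem.List.slice_from_natCast]
  simp [PySem.List.pyGetD_ofNat']

-- ===== VERDICT (by name: the statement is the Claim_ definition above) =====
theorem List1_spec : Claim_equal_List1 := by
  intro temp l1 list1 Maxlist Minlist _ hpre
  unfold Spec_List1
  have hn : l1.toNat ≤ list1.length := by
    have := hpre.2.1; omega
  rw [List1_bridge, List1_alt_bridge, pvLoop_eq l1.toNat list1 hn]
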